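-- pv_equiv track=rewrite | github.com/Prikolbas228/test_for_job | shoping.py | sell
-- ===== SOURCE A (Python) =====
-- def sell(category, nomer_tovara):
--     min_price = None
--     min_name = None
--     for item in nomer_tovara.values():
--         name, cat, price = item
--         if cat == category:
--             if min_price is None or price < min_price:
--                 min_price = price
--                 min_name = name
--     return min_name, min_price
-- ===== SOURCE B (Python) =====
-- def sell(category, nomer_tovara):
--     matches = [(name, price) for (name, cat, price) in nomer_tovara.values() if cat == category]
--     matches.sort(key=lambda t: t[1])
--     if matches:
--         return matches[0]
--     return None, None
-- ===== Notes on version B (the rewrite author's own statement) =====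
-- stated objective: alternative
-- what changed: Instead of tracking a running minimum with a None sentinel, B collects the matching (name, price) pairs and stably sorts them by price, returning the head of the sorted list; stability makes the first-encountered cheapest item come first, matching A's strict-< tie rule.
import Mathlib
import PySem

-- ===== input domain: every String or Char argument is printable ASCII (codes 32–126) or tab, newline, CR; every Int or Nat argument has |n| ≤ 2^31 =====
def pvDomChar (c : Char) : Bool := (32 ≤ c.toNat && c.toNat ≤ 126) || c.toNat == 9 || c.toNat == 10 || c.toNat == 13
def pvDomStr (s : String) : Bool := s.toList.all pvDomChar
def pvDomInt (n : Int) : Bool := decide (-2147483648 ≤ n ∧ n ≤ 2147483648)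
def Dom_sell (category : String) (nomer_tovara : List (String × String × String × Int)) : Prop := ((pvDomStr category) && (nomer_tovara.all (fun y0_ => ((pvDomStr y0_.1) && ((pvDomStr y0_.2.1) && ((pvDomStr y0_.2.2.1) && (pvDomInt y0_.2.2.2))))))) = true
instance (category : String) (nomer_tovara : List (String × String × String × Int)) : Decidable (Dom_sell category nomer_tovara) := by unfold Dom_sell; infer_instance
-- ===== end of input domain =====

-- B replaces A's None-sentinel running-minimum loop by collecting matching pairs and stably sorting them by price, returning the head (alternative algorithm; stability preserves A's first-on-tie rule).


-- ===== PORT A =====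
-- the for-loop over nomer_tovara.values() with the (min_name, min_price) state;
-- 'min_price is None or price < min_price' is the match on the second component
def sell (category : String) (nomer_tovara : List (String × String × String × Int)) : Option String × Option Int :=
  nomer_tovara.foldl
    (fun st item =>
      let name := item.2.1
      let cat := item.2.2.1
      let price := item.2.2.2
      if cat == category then
        match st.2 with
        | none => (some name, some price)
        | some mp => if price < mp then (some name, some price) else st
      else st)
    (none, none)

-- ===== PORT B =====
-- matches = [(name, price) … if cat == category]; matches.sort(key=price) is the stable
-- PySem.List.sorted; return matches[0] if non-empty else (None, None)
def sell_alt (category : String) (nomer_tovara : List (String × String × String × Int)) : Option String × Option Int :=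
  let ms := (nomer_tovara.map (fun x => x.2)).filterMap
    (fun t => if t.2.1 == category then some (t.1, t.2.2) else none)
  match PySem.List.sorted ms (fun t => t.2) with
  | [] => (none, none)
  | m :: _ => (some m.1, some m.2)

-- ===== PRECONDITION & SPEC =====
def Spec_sell (category : String) (nomer_tovara : List (String × String × String × Int)) (out : Option String × Option Int) : Prop := out = sell_alt category nomer_tovara
instance (category : String) (nomer_tovara : List (String × String × String × Int)) (out : Option String × Option Int) : Decidable (Spec_sell category nomer_tovara out) := by unfold Spec_sell; infer_instance

-- ===== CLAIM =====
def Claim_equal_sell : Prop := ∀ (category : String) (nomer_tovara : List (String × String × String × Int)), Dom_sell category nomer_tovara → Spec_sell category nomer_tovara (sell category nomer_tovara)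

-- ===== LEMMAS AND PROOFS =====

-- split an optional (name, price) pair into A's two-option state
def pvSplit (acc : Option (String × Int)) : Option String × Option Int :=
  (acc.map Prod.fst, acc.map Prod.snd)

-- A's running-minimum update on an optional (name, price) accumulator
def pvMinUpd (a : Option (String × Int)) (x : String × Int) : Option (String × Int) :=
  match a with
  | none => some x
  | some m => if x.2 < m.2 then some x else some m

-- A's loop, started from a split accumulator, simulates the running-min fold over the filtered list
theorem sell_loop_eq (category : String) (l : List (String × String × String × Int))
    (acc : Option (String × Int)) :
    l.foldl
      (fun st item =>
        let name := item.2.1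
        let cat := item.2.2.1
        let price := item.2.2.2
        if cat == category then
          match st.2 with
          | none => (some name, some price)
          | some mp => if price < mp then (some name, some price) else st
        else st)
      (pvSplit acc)
    = pvSplit
        (((l.map (fun x => x.2)).filterMap
            (fun t => if t.2.1 == category then some (t.1, t.2.2) else none)).foldl
          pvMinUpd acc) := by
  induction l generalizing acc with
  | nil => rfl
  | cons h t ih =>
    simp only [List.foldl_cons, List.map_cons, List.filterMap_cons]
    by_cases hc : h.2.2.1 == category
    · simp only [hc, if_pos]
      cases acc with
      | none => simpa [pvMinUpd] using ih (some (h.2.1, h.2.2.2))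
      | some m =>
        simp only [pvSplit, Option.map_some]
        by_cases hp : h.2.2.2 < m.2
        · simpa [pvMinUpd, hp] using ih (some (h.2.1, h.2.2.2))
        · simpa [pvMinUpd, hp] using ih (some m)
    · simp only [hc, if_neg, Bool.false_eq_true, not_false_iff]
      simpa [hc] using ih acc

-- head of the insertion-sort accumulator IS the running minimum with strict <
theorem head_foldl_insertBy (ms : List (String × Int)) (acc : List (String × Int)) :
    (ms.foldl (fun acc x =>
        PySem.List.insertBy (fun a b => decide ((a.2 : Int) < b.2)) x acc) acc).head?
    = ms.foldl pvMinUpd acc.head? := by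
  induction ms generalizing acc with
  | nil => rfl
  | cons x t ih =>
    simp only [List.foldl_cons]
    rw [ih]
    congr 1
    cases acc with
    | nil => rfl
    | cons y ys =>
      simp only [PySem.List.insertBy, pvMinUpd, List.head?_cons]
      by_cases h : x.2 < y.2 <;> simp [h]

-- ===== VERDICT =====
theorem sell_spec : Claim_equal_sell := by
  intro category nomer_tovara _
  unfold Spec_sell sell sell_alt
  have h := sell_loop_eq category nomer_tovara none
  simp only [pvSplit, Option.map_none] at h
  rw [h]
  simp only [PySem.List.sorted_eq_foldl_insertBy]
  have hh := head_foldl_insertBy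
    ((nomer_tovara.map (fun x => x.2)).filterMap
      (fun t => if t.2.1 == category then some (t.1, t.2.2) else none)) []
  simp only [List.head?_nil] at hh
  rw [← hh]
  cases hL : ((nomer_tovara.map (fun x => x.2)).filterMap
      (fun t => if t.2.1 == category then some (t.1, t.2.2) else none)).foldl
      (fun acc x =>
        PySem.List.insertBy (fun a b => decide ((a.2 : Int) < b.2)) x acc) [] with
  | nil => simp
  | cons m rest => simp
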